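-- pv_equiv track=rewrite | github.com/kittipat1413/codewar | sum_of_interval.py | append_intervals
-- ===== SOURCE A (Python) =====
-- def append_intervals(intervals):
--     for i in range(len(intervals)):
--         for j in range(i+1,len(intervals)):
--             if(intervals[i][1]>intervals[j][0]):
--                 if(intervals[j][1]>intervals[i][1]):
--                     intervals[i][1] = intervals[j][1]
--                     del intervals[j]
--                 else:
--                     del intervals[j]
--
--                 return(intervals,True)
--     return(intervals,False)
-- ===== SOURCE B (Python) =====
-- def append_intervals(intervals):
--     # Suffix-minimum of the interval starts, computed once back-to-front, decides for
--     # each i whether any later interval starts before intervals[i][1]; only the one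
--     # merging i scans its tail for the partner j. Mutates `intervals` in place like A.
--     n = len(intervals)
--     # mins[t] = smallest start among intervals[t+1:] (None if empty), built back-to-front
--     mins = [None]
--     cur = None
--     for iv in reversed(intervals[1:]):
--         s = iv[0]
--         cur = s if cur is None or s < cur else cur
--         mins.append(cur)
--     mins.reverse()
--     for i in range(n):
--         m = mins[i]
--         if m is not None and intervals[i][1] > m:
--             e = intervals[i][1]
--             for j in range(i + 1, n):
--                 if intervals[j][0] < e:
--                     if intervals[j][1] > e:
--                         intervals[i][1] = intervals[j][1]
--                     del intervals[j]
--                     return (intervals, True)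
--     return (intervals, False)
-- ===== Notes on version B (the rewrite author's own statement) =====
-- stated objective: alternative
-- what changed: Replaces A's per-i rescan of the whole tail with a single back-to-front suffix-minimum pass over the interval starts; the guard 'some later start < intervals[i][1]' is then a constant-time lookup and the tail is scanned for the partner j at most once (worst case O(n) vs A's O(n^2); on random inputs A's early exit makes it no faster in practice).
-- outside the precondition, e.g. on append_intervals([[1, 2], [3]]): A returns ([[1, 2], [3]], False), B returns ([[1, 2], [3]], False)
import Mathlib
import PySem

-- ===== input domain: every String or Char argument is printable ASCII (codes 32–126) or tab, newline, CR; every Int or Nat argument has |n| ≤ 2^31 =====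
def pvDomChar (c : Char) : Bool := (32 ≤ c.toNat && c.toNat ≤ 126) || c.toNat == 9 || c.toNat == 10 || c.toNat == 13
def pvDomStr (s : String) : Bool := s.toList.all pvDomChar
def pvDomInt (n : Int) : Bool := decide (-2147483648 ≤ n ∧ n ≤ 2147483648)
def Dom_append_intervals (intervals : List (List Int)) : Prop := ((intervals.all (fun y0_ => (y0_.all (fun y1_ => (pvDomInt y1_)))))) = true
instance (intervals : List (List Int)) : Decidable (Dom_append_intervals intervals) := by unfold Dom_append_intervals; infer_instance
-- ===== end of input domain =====

-- B replaces A's per-i rescan of the tail by one back-to-front suffix-minimum pass over the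
-- starts (objective: alternative algorithm). Both Pythons mutate `intervals` in place the same
-- way; the equivalence proved here is about the return value.

-- ===== PORT A =====
-- intervals[x][y]; in range under Pre_, so the defaults are never hit there
def pvGet2 (ivs : List (List Int)) (x y : Int) : Int :=
  PySem.List.pyGetD (PySem.List.pyGetD ivs x []) y 0

-- intervals[i][1] = v  (indices in range under Pre_)
def pvSetEnd (ivs : List (List Int)) (i v : Int) : List (List Int) :=
  PySem.List.pySetD ivs i (PySem.List.pySetD (PySem.List.pyGetD ivs i []) 1 v)

-- inner `for j in range(i+1, n)` with its early returns; `del intervals[j]` is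
-- List.eraseIdx j.toNat — exact for the in-range nonnegative j that range produces
def pvA_inner (ivs : List (List Int)) (i : Int) : List Int → Option (List (List Int) × Bool)
  | [] => none
  | j :: js =>
      if pvGet2 ivs i 1 > pvGet2 ivs j 0 then
        if pvGet2 ivs j 1 > pvGet2 ivs i 1 then
          some ((pvSetEnd ivs i (pvGet2 ivs j 1)).eraseIdx j.toNat, true)
        else
          some (ivs.eraseIdx j.toNat, true)
      else pvA_inner ivs i js

-- outer `for i in range(len(intervals))`; the list is only mutated at the point of return
def pvA_outer (ivs : List (List Int)) : List Int → List (List Int) × Bool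
  | [] => (ivs, false)
  | i :: is =>
      match pvA_inner ivs i (PySem.List.pyRange (i + 1) (PySem.List.len ivs) 1) with
      | some r => r
      | none => pvA_outer ivs is

def append_intervals (intervals : List (List Int)) : List (List Int) × Bool :=
  pvA_outer intervals (PySem.List.pyRange 0 (PySem.List.len intervals) 1)

-- ===== PORT B =====
-- one step of the backwards pass: `s = iv[0]; cur = s if cur is None or s < cur else cur; mins.append(cur)`
def pvB_minStep (st : Option Int × List (Option Int)) (iv : List Int) : Option Int × List (Option Int) :=
  let s := PySem.List.pyGetD iv 0 0
  let cur := match st.1 with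
    | none => some s
    | some c => if s < c then some s else some c
  (cur, st.2 ++ [cur])

-- `mins = [None]; for iv in reversed(intervals[1:]): …; mins.reverse()`
def pvB_mins (ivs : List (List Int)) : List (Option Int) :=
  ((((PySem.List.slice ivs (some 1) none).reverse).foldl pvB_minStep (none, [none])).2).reverse

-- inner `for j in range(i+1, n)` of B, with e = intervals[i][1] read once before the loop
def pvB_inner (ivs : List (List Int)) (i e : Int) : List Int → Option (List (List Int) × Bool)
  | [] => none
  | j :: js =>
      if pvGet2 ivs j 0 < e then
        some ((if pvGet2 ivs j 1 > e then pvSetEnd ivs i (pvGet2 ivs j 1) else ivs).eraseIdx j.toNat, true)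
      else pvB_inner ivs i e js

-- outer `for i in range(n)` with guard `m is not None and intervals[i][1] > m`
def pvB_outer (ivs : List (List Int)) (mins : List (Option Int)) : List Int → List (List Int) × Bool
  | [] => (ivs, false)
  | i :: is =>
      match PySem.List.pyGetD mins i none with
      | none => pvB_outer ivs mins is
      | some m =>
          if pvGet2 ivs i 1 > m then
            match pvB_inner ivs i (pvGet2 ivs i 1) (PySem.List.pyRange (i + 1) (PySem.List.len ivs) 1) with
            | some r => r
            | none => pvB_outer ivs mins is
          else pvB_outer ivs mins is

def append_intervals_alt (intervals : List (List Int)) : List (List Int) × Bool :=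
  pvB_outer intervals (pvB_mins intervals) (PySem.List.pyRange 0 (PySem.List.len intervals) 1)

-- ===== PRECONDITION & SPEC =====
-- Pre_ excludes lists (of ≥ 2 intervals) containing an interval with fewer than two entries:
-- on most of those both Pythons raise IndexError; on the rest (e.g. [[1,2],[3]]) A happens to
-- return before touching the missing entry, and both programs return the same value there.
def Pre_append_intervals (intervals : List (List Int)) : Prop :=
  intervals.length ≤ 1 ∨ ∀ iv ∈ intervals, 2 ≤ iv.length
instance (intervals : List (List Int)) : Decidable (Pre_append_intervals intervals) := by unfold Pre_append_intervals; infer_instance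

def pvWitness_append_intervals : List (List Int) := [[0, 3], [2, 5]]

def Spec_append_intervals (intervals : List (List Int)) (out : List (List Int) × Bool) : Prop := out = append_intervals_alt intervals
instance (intervals : List (List Int)) (out : List (List Int) × Bool) : Decidable (Spec_append_intervals intervals out) := by unfold Spec_append_intervals; infer_instance

-- ===== CLAIM (what is proved, stated in full; the proofs are below) =====
def Claim_equal_append_intervals : Prop := ∀ (intervals : List (List Int)), Dom_append_intervals intervals → Pre_append_intervals intervals → Spec_append_intervals intervals (append_intervals intervals)

-- ===== LEMMAS AND PROOFS =====

-- minimum of the starts of a list of intervals (none if empty): what B's backwards pass computes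
def pvSufMin : List (List Int) → Option Int
  | [] => none
  | iv :: rest =>
      match pvSufMin rest with
      | none => some (PySem.List.pyGetD iv 0 0)
      | some c =>
          if PySem.List.pyGetD iv 0 0 < c then some (PySem.List.pyGetD iv 0 0) else some c

-- the list [pvSufMin xs, pvSufMin xs.tail, …, pvSufMin [] = none]
def pvMinsSpec : List (List Int) → List (Option Int)
  | [] => [none]
  | iv :: rest => pvSufMin (iv :: rest) :: pvMinsSpec rest

theorem pv_fold_minStep (xs : List (List Int)) :
    xs.reverse.foldl pvB_minStep (none, [none]) = (pvSufMin xs, (pvMinsSpec xs).reverse) := by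
  induction xs with
  | nil => rfl
  | cons iv rest ih =>
      simp [List.foldl_append, ih, pvB_minStep, pvSufMin, pvMinsSpec]

theorem pv_mins_eq (ivs : List (List Int)) : pvB_mins ivs = pvMinsSpec ivs.tail := by
  unfold pvB_mins
  rw [PySem.List.slice_from_one, pv_fold_minStep, List.reverse_reverse]

theorem pv_minsSpec_getD (xs : List (List Int)) (k : Nat) :
    (pvMinsSpec xs).getD k none = pvSufMin (xs.drop k) := by
  induction xs generalizing k with
  | nil => cases k <;> simp [pvMinsSpec, pvSufMin]
  | cons iv rest ih => cases k with
      | zero => simp [pvMinsSpec]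
      | succ k => simpa [pvMinsSpec] using ih k

theorem pv_sufMin_none_iff (xs : List (List Int)) : pvSufMin xs = none ↔ xs = [] := by
  cases xs with
  | nil => simp [pvSufMin]
  | cons iv rest =>
      simp only [pvSufMin]
      cases h : pvSufMin rest
      · simp
      · split <;> simp
        split <;> simp

theorem pv_sufMin_le (xs : List (List Int)) (m : Int) (h : pvSufMin xs = some m) :
    ∀ iv ∈ xs, m ≤ PySem.List.pyGetD iv 0 0 := by
  induction xs generalizing m with
  | nil => simp [pvSufMin] at h
  | cons iv rest ih =>
      intro iv' hiv'
      simp only [pvSufMin] at h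
      cases hmem : pvSufMin rest with
      | none =>
          simp only [hmem] at h
          injection h with h
          rw [pv_sufMin_none_iff] at hmem
          subst hmem
          rcases List.mem_cons.mp hiv' with h1 | h2
          · subst h1; omega
          · simp at h2
      | some c =>
          simp only [hmem] at h
          have hc := ih c hmem
          rcases List.mem_cons.mp hiv' with h1 | h2
          · subst h1
            split at h <;> injection h with h <;> omega
          · have := hc iv' h2
            split at h <;> injection h with h <;> omega

theorem pv_innerA_eq_innerB (ivs : List (List Int)) (i : Int) (js : List Int) :
    pvA_inner ivs i js = pvB_inner ivs i (pvGet2 ivs i 1) js := by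
  induction js with
  | nil => rfl
  | cons j js ih =>
      simp only [pvA_inner, pvB_inner, ih]
      split
      · split <;> simp_all
      · rfl

theorem pv_innerA_none (ivs : List (List Int)) (i : Int) (js : List Int)
    (h : ∀ j ∈ js, ¬ (pvGet2 ivs j 0 < pvGet2 ivs i 1)) : pvA_inner ivs i js = none := by
  induction js with
  | nil => rfl
  | cons j js ih =>
      simp only [pvA_inner]
      rw [if_neg (h j (by simp))]
      exact ih (fun j' hj' => h j' (by simp [hj']))

theorem pv_outer_eq (ivs : List (List Int)) (is : List Int) (hnn : ∀ i ∈ is, 0 ≤ i) :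
    pvA_outer ivs is = pvB_outer ivs (pvB_mins ivs) is := by
  induction is with
  | nil => rfl
  | cons i is ih =>
      have hi : 0 ≤ i := hnn i (by simp)
      have hrec := ih (fun i' hi' => hnn i' (by simp [hi']))
      have hgetD : PySem.List.pyGetD (pvB_mins ivs) i none
          = pvSufMin (ivs.drop (i.toNat + 1)) := by
        rw [pv_mins_eq, PySem.List.pyGetD_of_nonneg _ _ hi, pv_minsSpec_getD,
          List.drop_tail]
      rcases hm : pvSufMin (ivs.drop (i.toNat + 1)) with _ | m <;>
        simp only [pvA_outer, pvB_outer, hgetD, hm]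
      · -- no interval to the right of i: A's inner range is empty
        rw [pv_sufMin_none_iff] at hm
        have hlen : ivs.length ≤ i.toNat + 1 := by
          by_contra hc
          exact absurd (List.drop_eq_nil_iff.mp hm) (by omega)
        have : PySem.List.pyRange (i + 1) (PySem.List.len ivs) 1 = [] := by
          apply PySem.List.pyRange_one_eq_nil
          simp [PySem.List.len_eq]
          omega
        rw [this]
        simpa [pvA_inner] using hrec
      · by_cases hgt : pvGet2 ivs i 1 > m
        · rw [if_pos hgt, pv_innerA_eq_innerB]
          cases pvB_inner ivs i (pvGet2 ivs i 1) (PySem.List.pyRange (i + 1) (PySem.List.len ivs) 1)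
          · exact hrec
          · rfl
        · rw [if_neg hgt]
          have hnone : pvA_inner ivs i (PySem.List.pyRange (i + 1) (PySem.List.len ivs) 1) = none := by
            apply pv_innerA_none
            intro j hj
            rw [PySem.List.mem_pyRange_one] at hj
            simp [PySem.List.len_eq] at hj
            have hj0 : 0 ≤ j := by omega
            have hjlen : j.toNat < ivs.length := by omega
            have hjget : PySem.List.pyGetD ivs j [] = ivs[j.toNat] :=
              PySem.List.pyGetD_eq_getElem _ _ hj0 (by omega)
            have hdropmem : ivs[j.toNat] ∈ ivs.drop (i.toNat + 1) := by
              have hle : i.toNat + 1 ≤ j.toNat := by omega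
              have hlt : j.toNat - (i.toNat + 1) < (ivs.drop (i.toNat + 1)).length := by
                simp [List.length_drop]; omega
              have : (ivs.drop (i.toNat + 1))[j.toNat - (i.toNat + 1)] = ivs[j.toNat] := by
                rw [List.getElem_drop]
                congr 1
                omega
              rw [← this]
              exact List.getElem_mem hlt
            have hle : m ≤ pvGet2 ivs j 0 := by
              simp only [pvGet2, hjget]
              exact pv_sufMin_le _ m hm _ hdropmem
            omega
          rw [hnone]
          exact hrec

-- ===== VERDICT (by name: the statement is the Claim_ definition above) =====
theorem append_intervals_spec : Claim_equal_append_intervals := by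
  intro intervals _ _
  unfold Spec_append_intervals append_intervals append_intervals_alt
  apply pv_outer_eq
  intro i hi
  rw [PySem.List.mem_pyRange_one] at hi
  exact hi.1
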